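-- pv_equiv track=rewrite | github.com/callmewenhao/leetcode | contests/biweekly-contest-101/T1.py | minNumber1
-- ===== SOURCE A (Python) =====
-- from typing import List
--
-- def minNumber1(nums1: List[int], nums2: List[int]) -> int:
--     nums1.sort()
--     nums2.sort()
--
--     for n1 in nums1:
--         if n1 in nums2:
--             return n1
--
--     mi1 = min(nums1)
--     mi2 = min(nums2)
--
--     return mi1 * 10 + mi2 if mi1 < mi2 else mi2 * 10 + mi1
-- ===== SOURCE B (Python) =====
-- def minNumber1(nums1, nums2):
--     nums1.sort()
--     nums2.sort()
--     i = j = 0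
--     while i < len(nums1) and j < len(nums2):
--         if nums1[i] == nums2[j]:
--             return nums1[i]
--         if nums1[i] < nums2[j]:
--             i += 1
--         else:
--             j += 1
--     a, b = nums1[0], nums2[0]
--     return a * 10 + b if a < b else b * 10 + a
-- ===== Notes on version B (the rewrite author's own statement) =====
-- stated objective: alternative
-- what changed: Replaces A's outer scan with a per-element 'in'-membership test over the other list by a single two-pointer merge walk over the two sorted lists, reading the fallback minima as the sorted heads.
import Mathlib
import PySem

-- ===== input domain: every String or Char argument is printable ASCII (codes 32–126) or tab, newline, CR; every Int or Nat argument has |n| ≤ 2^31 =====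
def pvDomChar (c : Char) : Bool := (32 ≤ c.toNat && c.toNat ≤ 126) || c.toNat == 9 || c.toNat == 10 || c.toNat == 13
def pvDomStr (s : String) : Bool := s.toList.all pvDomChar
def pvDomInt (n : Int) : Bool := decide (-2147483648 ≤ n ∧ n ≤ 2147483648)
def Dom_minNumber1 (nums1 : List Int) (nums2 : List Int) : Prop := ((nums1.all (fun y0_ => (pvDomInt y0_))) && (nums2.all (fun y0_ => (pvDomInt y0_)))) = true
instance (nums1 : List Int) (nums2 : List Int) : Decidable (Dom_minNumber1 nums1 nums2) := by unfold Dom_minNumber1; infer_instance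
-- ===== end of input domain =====

-- B replaces A per-element membership scan by a two-pointer merge over the two sorted lists (alternative algorithm); both sort their arguments in place, equivalence is about the return value.


-- ===== PORT A =====
-- the 'for n1 in nums1: if n1 in nums2: return n1' loop
def pyFindCommon : List Int → List Int → Option Int
  | [], _ => none
  | x :: xs, s2 => if s2.contains x then some x else pyFindCommon xs s2

def minNumber1 (nums1 : List Int) (nums2 : List Int) : Int :=
  let s1 := PySem.List.sorted nums1 (fun x => x) false
  let s2 := PySem.List.sorted nums2 (fun x => x) false
  match pyFindCommon s1 s2 with
  | some n => n
  | none =>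
    match PySem.List.min? s1 (fun x => x), PySem.List.min? s2 (fun x => x) with
    | some mi1, some mi2 => if mi1 < mi2 then mi1 * 10 + mi2 else mi2 * 10 + mi1
    | _, _ => 0  -- unreachable under Pre_: Python's min([]) raises ValueError

-- ===== PORT B =====
-- the two-pointer while loop (pointer advance = dropping the head of that list)
def twoPtr : List Int → List Int → Option Int
  | a :: as_, b :: bs =>
    if a = b then some a
    else if a < b then twoPtr as_ (b :: bs)
    else twoPtr (a :: as_) bs
  | _, _ => none
termination_by l1 l2 => l1.length + l2.length

def minNumber1_alt (nums1 : List Int) (nums2 : List Int) : Int :=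
  let s1 := PySem.List.sorted nums1 (fun x => x) false
  let s2 := PySem.List.sorted nums2 (fun x => x) false
  match twoPtr s1 s2 with
  | some n => n
  | none =>
    match s1, s2 with
    | a :: _, b :: _ => if a < b then a * 10 + b else b * 10 + a
    | _, _ => 0  -- unreachable under Pre_: Python's nums1[0] raises IndexError

-- ===== PRECONDITION & SPEC =====
-- A raises ValueError (min of empty list) when either list is empty; B raises IndexError there.
def Pre_minNumber1 (nums1 : List Int) (nums2 : List Int) : Prop := nums1 ≠ [] ∧ nums2 ≠ []
instance (nums1 : List Int) (nums2 : List Int) : Decidable (Pre_minNumber1 nums1 nums2) := by unfold Pre_minNumber1; infer_instance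
def pvWitness_minNumber1 : List Int × List Int := ([3, 1], [5, 2])

def Spec_minNumber1 (nums1 : List Int) (nums2 : List Int) (out : Int) : Prop := out = minNumber1_alt nums1 nums2
instance (nums1 : List Int) (nums2 : List Int) (out : Int) : Decidable (Spec_minNumber1 nums1 nums2 out) := by unfold Spec_minNumber1; infer_instance

-- ===== CLAIM (what is proved, stated in full; the proofs are below) =====
def Claim_equal_minNumber1 : Prop := ∀ (nums1 : List Int) (nums2 : List Int), Dom_minNumber1 nums1 nums2 → Pre_minNumber1 nums1 nums2 → Spec_minNumber1 nums1 nums2 (minNumber1 nums1 nums2)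

-- ===== LEMMAS AND PROOFS =====

theorem pyFindCommon_nil_right : ∀ (l : List Int), pyFindCommon l [] = none := by
  intro l; induction l with
  | nil => rfl
  | cons x xs ih => simp [pyFindCommon, ih]

theorem pyFindCommon_drop_head (b : Int) (bs : List Int) :
    ∀ (l : List Int), (∀ x ∈ l, b < x) → pyFindCommon l (b :: bs) = pyFindCommon l bs := by
  intro l; induction l with
  | nil => intro _; rfl
  | cons x xs ih =>
    intro h
    have hxb : b < x := h x (by simp)
    have hne : (x == b) = false := by simp; omega
    simp only [pyFindCommon, List.contains_cons, hne, Bool.false_or]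
    exact if_congr Iff.rfl rfl (ih (fun y hy => h y (by simp [hy])))

theorem twoPtr_eq_aux : ∀ (n : Nat) (s1 s2 : List Int), s1.length + s2.length ≤ n →
    s1.Pairwise (· ≤ ·) → s2.Pairwise (· ≤ ·) → twoPtr s1 s2 = pyFindCommon s1 s2 := by
  intro n
  induction n with
  | zero =>
    intro s1 s2 hlen _ _
    match s1, s2 with
    | [], s2 => simp [twoPtr, pyFindCommon]
    | x :: xs, s2 => simp at hlen
  | succ n ih =>
    intro s1 s2 hlen h1 h2
    match s1, s2 with
    | [], s2 => simp [twoPtr, pyFindCommon]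
    | x :: xs, [] => rw [pyFindCommon_nil_right]; simp [twoPtr]
    | a :: as_, b :: bs =>
      rcases List.pairwise_cons.mp h1 with ⟨ha, has⟩
      rcases List.pairwise_cons.mp h2 with ⟨hb, hbs⟩
      simp only [List.length_cons] at hlen
      rw [twoPtr]
      by_cases hab : a = b
      · subst hab
        simp [pyFindCommon]
      · rw [if_neg hab]
        by_cases hlt : a < b
        · rw [if_pos hlt]
          have hnc : ((b :: bs).contains a) = false := by
            simp only [List.contains_cons, Bool.or_eq_false_iff]
            refine ⟨by simp; omega, ?_⟩
            simp only [List.contains_eq_any_beq, List.any_eq_false]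
            intro y hy
            have := hb y hy
            simp; omega
          rw [pyFindCommon, hnc, if_neg (by simp)]
          exact ih as_ (b :: bs) (by simp; omega) has h2
        · rw [if_neg hlt]
          have hbl : b < a := by omega
          have hall : ∀ x ∈ a :: as_, b < x := by
            intro x hx
            rcases List.mem_cons.mp hx with h | h
            · omega
            · have := ha x h; omega
          rw [ih (a :: as_) bs (by simp; omega) h1 hbs,
              pyFindCommon_drop_head b bs (a :: as_) hall]

theorem min?_eq_sorted_head (nums : List Int) (h : Int) (t : List Int)
    (hs : PySem.List.sorted nums (fun x => x) false = h :: t) :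
    PySem.List.min? nums (fun x => x) = some h := by
  have hhmem : h ∈ nums := by
    have : h ∈ PySem.List.sorted nums (fun x => x) false := by rw [hs]; simp
    exact (PySem.List.mem_sorted nums (fun x => x) false h).mp this
  have hne : nums ≠ [] := List.ne_nil_of_mem hhmem
  obtain ⟨m, hm⟩ : ∃ m, PySem.List.min? nums (fun x => x) = some m := by
    cases hmin : PySem.List.min? nums (fun x => x) with
    | none => exact absurd ((PySem.List.min?_eq_none_iff nums (fun x => x)).mp hmin) hne
    | some m => exact ⟨m, rfl⟩
  have hmmem : m ∈ nums := PySem.List.min?_mem hm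
  have hmmin : ∀ y ∈ nums, m ≤ y := PySem.List.min?_isMin hm
  have hhle : ∀ y ∈ nums, h ≤ y := PySem.List.key_head_sorted_le nums (fun x => x) hs
  have : m = h := le_antisymm (hmmin h hhmem) (hhle m hmmem)
  rw [hm, this]

-- ===== VERDICT (by name: the statement is the Claim_ definition above) =====
theorem minNumber1_spec : Claim_equal_minNumber1 := by
  intro nums1 nums2 _ hpre
  unfold Spec_minNumber1 minNumber1 minNumber1_alt
  obtain ⟨h1, h2⟩ := hpre
  have hs1ne : PySem.List.sorted nums1 (fun x => x) false ≠ [] := by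
    rw [Ne, PySem.List.sorted_eq_nil_iff]; exact h1
  have hs2ne : PySem.List.sorted nums2 (fun x => x) false ≠ [] := by
    rw [Ne, PySem.List.sorted_eq_nil_iff]; exact h2
  obtain ⟨a, as_, hsa⟩ := List.exists_cons_of_ne_nil hs1ne
  obtain ⟨b, bs, hsb⟩ := List.exists_cons_of_ne_nil hs2ne
  simp only []
  rw [twoPtr_eq_aux
        ((PySem.List.sorted nums1 (fun x => x) false).length +
         (PySem.List.sorted nums2 (fun x => x) false).length) _ _ le_rfl
        (PySem.List.sorted_pairwise nums1 (fun x => x))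
        (PySem.List.sorted_pairwise nums2 (fun x => x))]
  cases hfc : pyFindCommon (PySem.List.sorted nums1 (fun x => x) false)
      (PySem.List.sorted nums2 (fun x => x) false) with
  | some n => rfl
  | none =>
    have hm1 : PySem.List.min? (PySem.List.sorted nums1 (fun x => x) false) (fun x => x) = some a :=
      min?_eq_sorted_head _ a as_ (by rw [PySem.List.sorted_sorted]; exact hsa)
    have hm2 : PySem.List.min? (PySem.List.sorted nums2 (fun x => x) false) (fun x => x) = some b :=
      min?_eq_sorted_head _ b bs (by rw [PySem.List.sorted_sorted]; exact hsb)
    rw [hm1, hm2, hsa, hsb]
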